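-- pv_equiv track=rewrite | github.com/InasK6/Measurement-of-DNA-sequence-alignment | TacheD.py | coupure
-- ===== SOURCE A (Python) =====
-- def C_sub(a,b):
--     if(a==b):
--         return 0
--     if((a=='A' and b=='T') or (a=='T' and b=='A') or (a=='G' and b=='C') or (a=='C' and b=='G') ):
--         return 3
--     else:
--         return 4
--
-- def coupure(x,y):
--     ly=len(y)
--     lx=len(x)
--     I=[[0]*(ly+1),[0]*(ly+1)]
--     for j in range(ly+1):
--         I[0][j]=j
--         I[1][j]=j
--     D=[[],[]]
--     for j in range(ly+1):
--         D[0]=D[0]+[j*2]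
--         D[1]=D[1]+[0]
--     for i in range (1,lx+1):
--         D[1][0]=2*i
--         for j in range(1,ly+1):
--             D[1][j]=min([2+D[1][j-1],2+D[0][j],C_sub(x[i-1],y[j-1])+D[0][j-1]])
--
--         if(i>(lx//2)):
--              for j in range(ly+1):
--                  if(D[1][j]==2+D[1][j-1]) :
--                      I[1][j]=I[1][j-1]
--
--                  else:
--                      if(D[1][j]==2+D[0][j]):
--                          I[1][j]=I[1][j]
--
--                      else:
--                          if (D[1][j]==(C_sub(x[i-1],y[j-1])+D[0][j-1])):
--                              I[1][j]=I[0][j-1]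
--
--         for j in range(ly+1):
--             D[0][j]=D[1][j]
--         if(i>(lx//2)):
--                for j in range(ly+1):
--                    I[0][j]=I[1][j]
--
--     return I[1][ly]
-- ===== SOURCE B (Python) =====
-- def C_sub(a, b):
--     if a == b:
--         return 0
--     if (a == 'A' and b == 'T') or (a == 'T' and b == 'A') or (a == 'G' and b == 'C') or (a == 'C' and b == 'G'):
--         return 3
--     return 4
--
-- def coupure(x, y):
--     lx, ly = len(x), len(y)
--     # alignment-cost table, built column by column; T[j][i] is the cost of
--     # aligning x[:i] with y[:j] (gap = 2, substitution = C_sub)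
--     T = [[2 * i for i in range(lx + 1)]]
--     for j in range(1, ly + 1):
--         col = [2 * j]
--         for i in range(1, lx + 1):
--             col.append(min(2 + T[j - 1][i], 2 + col[i - 1],
--                            C_sub(x[i - 1], y[j - 1]) + T[j - 1][i - 1]))
--         T.append(col)
--     # propagate the cut column across the upper half of the rows: cut[j] is the
--     # column at which the alignment path through cell (i, j) crosses row lx//2
--     cut = list(range(ly + 1))
--     for i in range(lx // 2 + 1, lx + 1):
--         nxt = cut[:]
--         for j in range(ly + 1):
--             if T[j][i] == 2 + T[j - 1][i]:
--                 nxt[j] = nxt[j - 1]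
--             elif T[j][i] != 2 + T[j][i - 1]:
--                 nxt[j] = cut[j - 1]
--         cut = nxt
--     return cut[ly]
-- ===== Notes on version B (the rewrite author's own statement) =====
-- stated objective: alternative
-- what changed: A interleaves everything in one loop over two rolling 2-row buffers with explicit copy-back passes and a guarded in-place cut-index update; B separates the two concerns: it first builds the complete cost table column by column (transposed layout), then runs a single cut-propagation pass over only the upper half of the rows, deriving each new cut row from a copy of the previous one.
import Mathlib
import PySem

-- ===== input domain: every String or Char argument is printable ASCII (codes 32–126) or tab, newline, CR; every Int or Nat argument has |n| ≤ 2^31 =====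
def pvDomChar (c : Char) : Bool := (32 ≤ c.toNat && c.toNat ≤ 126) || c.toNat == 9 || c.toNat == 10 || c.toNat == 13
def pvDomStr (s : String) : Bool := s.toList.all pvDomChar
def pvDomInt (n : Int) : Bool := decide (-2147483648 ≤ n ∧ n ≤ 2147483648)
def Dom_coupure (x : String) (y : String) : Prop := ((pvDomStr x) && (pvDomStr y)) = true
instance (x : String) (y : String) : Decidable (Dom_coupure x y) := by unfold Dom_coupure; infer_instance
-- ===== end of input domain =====

-- B separates A's single interleaved loop into two phases: it builds the full cost table
-- column by column (transposed layout) and then propagates the cut row over only the upper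
-- half of the rows, each new cut row derived from a copy of the previous one; objective:
-- alternative decomposition, same cost.

-- ===== PORT A =====
-- helper C_sub of the module, shared by both Pythons
def C_subL (a b : Char) : Int :=
  if a == b then 0
  else if (a == 'A' && b == 'T') || (a == 'T' && b == 'A') || (a == 'G' && b == 'C') || (a == 'C' && b == 'G') then 3
  else 4

-- body of A's outer 'for i in range(1, lx+1)' loop, on the state ((D[0], D[1]), I[0], I[1])
def aStep (cx cy : List Char) (ly lx : Nat)
    (s : (List Int × List Int) × List Int × List Int) (i : Int) :
    (List Int × List Int) × List Int × List Int :=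
  let D0 := s.1.1
  let D1 := s.1.2
  let I0 := s.2.1
  let I1 := s.2.2
  -- D[1][0] = 2*i
  let D1 := PySem.List.pySetD D1 0 (2*i)
  -- for j in range(1, ly+1): D[1][j] = min([2+D[1][j-1], 2+D[0][j], C_sub(x[i-1],y[j-1])+D[0][j-1]])
  let D1 := (PySem.List.pyRange 1 ((ly : Int)+1) 1).foldl
      (fun d j => PySem.List.pySetD d j
        (min (2 + PySem.List.pyGetD d (j-1) 0)
          (min (2 + PySem.List.pyGetD D0 j 0)
            (C_subL (PySem.List.pyGetD cx (i-1) ' ') (PySem.List.pyGetD cy (j-1) ' ')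
              + PySem.List.pyGetD D0 (j-1) 0)))) D1
  -- if i > lx//2: for j in range(ly+1): … update I[1][j] …
  let I1 := if i > PySem.Int.floordiv (lx : Int) 2 then
      (PySem.List.pyRange 0 ((ly : Int)+1) 1).foldl
        (fun t j =>
          if PySem.List.pyGetD D1 j 0 == 2 + PySem.List.pyGetD D1 (j-1) 0 then
            PySem.List.pySetD t j (PySem.List.pyGetD t (j-1) 0)
          else if PySem.List.pyGetD D1 j 0 == 2 + PySem.List.pyGetD D0 j 0 then
            PySem.List.pySetD t j (PySem.List.pyGetD t j 0)
          else if PySem.List.pyGetD D1 j 0 ==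
              C_subL (PySem.List.pyGetD cx (i-1) ' ') (PySem.List.pyGetD cy (j-1) ' ')
                + PySem.List.pyGetD D0 (j-1) 0 then
            PySem.List.pySetD t j (PySem.List.pyGetD I0 (j-1) 0)
          else t) I1
    else I1
  -- for j in range(ly+1): D[0][j] = D[1][j]
  let D0 := (PySem.List.pyRange 0 ((ly : Int)+1) 1).foldl
      (fun a j => PySem.List.pySetD a j (PySem.List.pyGetD D1 j 0)) D0
  -- if i > lx//2: for j in range(ly+1): I[0][j] = I[1][j]
  let I0 := if i > PySem.Int.floordiv (lx : Int) 2 then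
      (PySem.List.pyRange 0 ((ly : Int)+1) 1).foldl
        (fun a j => PySem.List.pySetD a j (PySem.List.pyGetD I1 j 0)) I0
    else I0
  ((D0, D1), I0, I1)

def coupure (x : String) (y : String) : Int :=
  let cx := x.toList
  let cy := y.toList
  let ly := cy.length
  let lx := cx.length
  -- I = [[0]*(ly+1), [0]*(ly+1)]; for j in range(ly+1): I[0][j]=j; I[1][j]=j
  let Ipair := (PySem.List.pyRange 0 ((ly : Int)+1) 1).foldl
      (fun (p : List Int × List Int) j => (PySem.List.pySetD p.1 j j, PySem.List.pySetD p.2 j j))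
      (List.replicate (ly+1) 0, List.replicate (ly+1) 0)
  -- D = [[],[]]; for j in range(ly+1): D[0]=D[0]+[j*2]; D[1]=D[1]+[0]
  let Dpair := (PySem.List.pyRange 0 ((ly : Int)+1) 1).foldl
      (fun (p : List Int × List Int) j => (p.1 ++ [j*2], p.2 ++ [0]))
      (([] : List Int), ([] : List Int))
  -- for i in range(1, lx+1): …
  let st := (PySem.List.pyRange 1 ((lx : Int)+1) 1).foldl (aStep cx cy ly lx) (Dpair, Ipair)
  -- return I[1][ly]
  PySem.List.pyGetD st.2.2 (ly : Int) 0

-- ===== PORT B =====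
-- col = [2*j]; for i in range(1, lx+1): col.append(min(2+T[j-1][i], 2+col[i-1], C_sub(x[i-1],y[j-1])+T[j-1][i-1]))
def buildCol (prev : List Int) (cx cy : List Char) (j : Int) (lx : Nat) : List Int :=
  (PySem.List.pyRange 1 ((lx : Int)+1) 1).foldl
    (fun col i => col ++ [min (2 + PySem.List.pyGetD prev i 0)
      (min (2 + PySem.List.pyGetD col (i-1) 0)
        (C_subL (PySem.List.pyGetD cx (i-1) ' ') (PySem.List.pyGetD cy (j-1) ' ')
          + PySem.List.pyGetD prev (i-1) 0))])
    [2*j]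

-- T = [[2*i for i in range(lx+1)]]; for j in range(1, ly+1): T.append(col built from T[j-1])
def buildTableT (cx cy : List Char) (lx ly : Nat) : List (List Int) :=
  (PySem.List.pyRange 1 ((ly : Int)+1) 1).foldl
    (fun T j => T ++ [buildCol (PySem.List.pyGetD T (j-1) []) cx cy j lx])
    [(PySem.List.pyRange 0 ((lx : Int)+1) 1).map (fun i => 2*i)]

def coupure_alt (x : String) (y : String) : Int :=
  let cx := x.toList
  let cy := y.toList
  let lx := cx.length
  let ly := cy.length
  let T := buildTableT cx cy lx ly
  -- cut = list(range(ly+1))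
  let cut0 : List Int := (PySem.List.pyRange 0 ((ly : Int)+1) 1).map (fun j => j)
  -- for i in range(lx//2 + 1, lx+1): nxt = cut[:]; for j in range(ly+1): …; cut = nxt
  let cut := (PySem.List.pyRange ((lx/2 + 1 : Nat) : Int) ((lx : Int)+1) 1).foldl
    (fun cut i =>
      (PySem.List.pyRange 0 ((ly : Int)+1) 1).foldl
        (fun nxt j =>
          if PySem.List.pyGetD (PySem.List.pyGetD T j []) i 0 ==
              2 + PySem.List.pyGetD (PySem.List.pyGetD T (j-1) []) i 0 then
            PySem.List.pySetD nxt j (PySem.List.pyGetD nxt (j-1) 0)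
          else if !(PySem.List.pyGetD (PySem.List.pyGetD T j []) i 0 ==
              2 + PySem.List.pyGetD (PySem.List.pyGetD T j []) (i-1) 0) then
            PySem.List.pySetD nxt j (PySem.List.pyGetD cut (j-1) 0)
          else nxt)
        cut)
    cut0
  -- return cut[ly]
  PySem.List.pyGetD cut (ly : Int) 0

-- ===== PRECONDITION & SPEC =====
def Spec_coupure (x : String) (y : String) (out : Int) : Prop := out = coupure_alt x y
instance (x : String) (y : String) (out : Int) : Decidable (Spec_coupure x y out) := by unfold Spec_coupure; infer_instance

-- ===== CLAIM (what is proved, stated in full; the proofs are below) =====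
def Claim_equal_coupure : Prop := ∀ (x : String) (y : String), Dom_coupure x y → Spec_coupure x y (coupure x y)

-- ===== LEMMAS AND PROOFS =====

-- the cost table as a mathematical function
def Ttab (cx cy : List Char) : Nat → Nat → Int
  | 0, j => 2*(j : Int)
  | (i+1), 0 => 2*((i : Int)+1)
  | (i+1), (j+1) => min (2 + Ttab cx cy (i+1) j)
      (min (2 + Ttab cx cy i (j+1)) (C_subL (cx.getD i ' ') (cy.getD j ' ') + Ttab cx cy i j))
termination_by i j => (i, j)
decreasing_by
  · exact Prod.Lex.right _ (by omega)
  · exact Prod.Lex.left _ _ (by omega)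
  · exact Prod.Lex.left _ _ (by omega)

def rowL (cx cy : List Char) (ly i : Nat) : List Int :=
  (List.range (ly+1)).map (fun j => Ttab cx cy i j)

def colL (cx cy : List Char) (lx j : Nat) : List Int :=
  (List.range (lx+1)).map (fun i => Ttab cx cy i j)

def TBLT (cx cy : List Char) (lx ly : Nat) : List (List Int) :=
  (List.range (ly+1)).map (colL cx cy lx)

-- the cut-propagation map: row p+1 of the cut table from row p
def Jrow (cx cy : List Char) (ly p : Nat) (prev : Nat → Int) : Nat → Int
  | 0 => if Ttab cx cy (p+1) 0 = 2 + Ttab cx cy (p+1) ly then prev ly else prev 0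
  | (j+1) =>
      if Ttab cx cy (p+1) (j+1) = 2 + Ttab cx cy (p+1) j then Jrow cx cy ly p prev j
      else if Ttab cx cy (p+1) (j+1) = 2 + Ttab cx cy p (j+1) then prev (j+1)
      else if Ttab cx cy (p+1) (j+1) = C_subL (cx.getD p ' ') (cy.getD j ' ') + Ttab cx cy p j then prev j
      else prev (j+1)

-- cut value at row k, column j (identity up to row m = lx//2, then Jrow steps)
def Jfun (cx cy : List Char) (m ly : Nat) : Nat → Nat → Int
  | 0, j => (j : Int)
  | (p+1), j => if p+1 ≤ m then (j : Int) else Jrow cx cy ly p (Jfun cx cy m ly p) j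

def Jmap (cx cy : List Char) (m ly k : Nat) : List Int :=
  (List.range (ly+1)).map (Jfun cx cy m ly k)

def zerosL (ly : Nat) : List Int := List.replicate (ly+1) 0

-- A's loop state after k outer iterations
def PA (cx cy : List Char) (lx ly : Nat) (k : Nat) : (List Int × List Int) × List Int × List Int :=
  ((rowL cx cy ly k, if k = 0 then zerosL ly else rowL cx cy ly k),
    Jmap cx cy (lx/2) ly k, Jmap cx cy (lx/2) ly k)

-- generic loop-invariant lemma for 'for k in range(s, s+n)' folds
lemma foldl_range_inv {α : Type} (step : α → Int → α) (P : Nat → α) (s : Nat) :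
    ∀ n, (∀ k : Nat, k < n → step (P k) ((s+k : Nat) : Int) = P (k+1)) →
    (PySem.List.pyRange (s : Int) (((s+n : Nat)) : Int) 1).foldl step (P 0) = P n := by
  intro n
  induction n with
  | zero => intro _; simp [PySem.List.pyRange_one_eq_nil]
  | succ n ih =>
    intro h
    have hc : (((s+(n+1) : Nat)) : Int) = ((s+n : Nat) : Int) + 1 := by push_cast; ring
    rw [hc, PySem.List.pyRange_one_succ_right (by push_cast; omega), List.foldl_append]
    rw [ih (fun k hk => h k (by omega))]
    simpa using h n (by omega)

lemma pyRange_zero_nat' (n : Nat) :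
    (PySem.List.pyRange 0 ((n : Int)) 1) = (List.range n).map (fun k : Nat => (k : Int)) := by
  rw [PySem.List.pyRange_one]
  simp only [Int.sub_zero, Int.toNat_natCast, zero_add]

lemma Ttab_zero (cx cy : List Char) (i : Nat) : Ttab cx cy i 0 = 2*(i : Int) := by
  cases i <;> simp [Ttab]

lemma Ttab_succ (cx cy : List Char) (i j : Nat) :
    Ttab cx cy (i+1) (j+1) = min (2 + Ttab cx cy (i+1) j)
      (min (2 + Ttab cx cy i (j+1)) (C_subL (cx.getD i ' ') (cy.getD j ' ') + Ttab cx cy i j)) := by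
  rw [Ttab]

-- a min of three that misses the first two meets the third
lemma min3_third (a b c T : Int) (h : T = min a (min b c)) (h1 : T ≠ a) (h2 : T ≠ b) : T = c := by
  rcases min_choice a (min b c) with h' | h'
  · exact absurd (h.trans h') h1
  · rcases min_choice b c with h'' | h''
    · exact absurd (h.trans (h'.trans h'')) h2
    · exact h.trans (h'.trans h'')

lemma length_rowL (cx cy : List Char) (ly i : Nat) : (rowL cx cy ly i).length = ly+1 := by
  simp [rowL]

lemma rowL_getD (cx cy : List Char) (ly i j : Nat) (h : j ≤ ly) :
    (rowL cx cy ly i).getD j 0 = Ttab cx cy i j :=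
  PySem.List.getD_map_range _ _ _ _ (by omega)

lemma pyGetD_cast {α : Type} (l : List α) (j : Nat) (d : α) :
    PySem.List.pyGetD l ((j : Int)) d = l.getD j d := by
  simp

lemma rowL_read (cx cy : List Char) (ly i j : Nat) (h : j ≤ ly) :
    PySem.List.pyGetD (rowL cx cy ly i) ((j : Int)) 0 = Ttab cx cy i j := by
  rw [pyGetD_cast]; exact rowL_getD cx cy ly i j h

lemma rowL_read_neg (cx cy : List Char) (ly i : Nat) :
    PySem.List.pyGetD (rowL cx cy ly i) (-1) 0 = Ttab cx cy i ly := by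
  have hne : rowL cx cy ly i ≠ [] := by simp [rowL]
  rw [PySem.List.pyGetD_neg_one _ _ hne, List.getLast_eq_getElem]
  simp [rowL]

lemma colL_read (cx cy : List Char) (lx j i : Nat) (h : i ≤ lx) :
    PySem.List.pyGetD (colL cx cy lx j) ((i : Int)) 0 = Ttab cx cy i j := by
  rw [pyGetD_cast]
  exact PySem.List.getD_map_range _ _ _ _ (by omega)

lemma TBLT_read (cx cy : List Char) (lx ly j : Nat) (h : j ≤ ly) :
    PySem.List.pyGetD (TBLT cx cy lx ly) ((j : Int)) [] = colL cx cy lx j := by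
  rw [pyGetD_cast]
  exact PySem.List.getD_map_range _ _ _ _ (by omega)

lemma TBLT_read_neg (cx cy : List Char) (lx ly : Nat) :
    PySem.List.pyGetD (TBLT cx cy lx ly) (-1) [] = colL cx cy lx ly := by
  have hne : TBLT cx cy lx ly ≠ [] := by simp [TBLT]
  rw [PySem.List.pyGetD_neg_one _ _ hne, List.getLast_eq_getElem]
  simp [TBLT]

lemma length_Jmap (cx cy : List Char) (m ly k : Nat) : (Jmap cx cy m ly k).length = ly+1 := by
  simp [Jmap]

lemma Jmap_getElem (cx cy : List Char) (m ly k j : Nat) (h : j < ly+1) :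
    (Jmap cx cy m ly k)[j]'(by rw [length_Jmap]; omega) = Jfun cx cy m ly k j := by
  simp [Jmap]

lemma Jmap_read (cx cy : List Char) (m ly k j : Nat) (h : j ≤ ly) :
    PySem.List.pyGetD (Jmap cx cy m ly k) ((j : Int)) 0 = Jfun cx cy m ly k j := by
  rw [pyGetD_cast]
  exact PySem.List.getD_map_range _ _ _ _ (by omega)

lemma Jmap_read_neg (cx cy : List Char) (m ly k : Nat) :
    PySem.List.pyGetD (Jmap cx cy m ly k) (-1) 0 = Jfun cx cy m ly k ly := by
  have hne : Jmap cx cy m ly k ≠ [] := by simp [Jmap]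
  rw [PySem.List.pyGetD_neg_one _ _ hne, List.getLast_eq_getElem]
  simp [Jmap]

lemma Jmap_getD (cx cy : List Char) (m ly k j : Nat) (h : j ≤ ly) :
    (Jmap cx cy m ly k).getD j 0 = Jfun cx cy m ly k j := by
  rw [← pyGetD_cast]
  exact Jmap_read cx cy m ly k j h

lemma Jfun_id (cx cy : List Char) (m ly : Nat) (k : Nat) (hk : k ≤ m) (j : Nat) :
    Jfun cx cy m ly k j = (j : Int) := by
  cases k with
  | zero => rfl
  | succ p => rw [Jfun, if_pos hk]

lemma Jfun_step (cx cy : List Char) (m ly p : Nat) (hm : m < p+1) (j : Nat) :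
    Jfun cx cy m ly (p+1) j = Jrow cx cy ly p (Jfun cx cy m ly p) j := by
  rw [Jfun, if_neg (by omega)]

lemma set_zero_head (l : List Int) (v : Int) (h : 0 < l.length) : l.set 0 v = v :: l.drop 1 := by
  cases l
  · simp at h
  · simp

-- setting every index of a list to g(j)
lemma setAll (g : Int → Int) (n : Nat) (a : List Int) (h : a.length = n) :
    (PySem.List.pyRange 0 ((n : Int)) 1).foldl (fun acc j => PySem.List.pySetD acc j (g j)) a
      = (List.range n).map (fun k => g ((k : Nat) : Int)) := by
  have main := foldl_range_inv (fun acc j => PySem.List.pySetD acc j (g j))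
    (fun j => (List.range j).map (fun k => g ((k : Nat) : Int)) ++ a.drop j) 0 n ?_
  · simpa [List.drop_eq_nil_of_le, h] using main
  · intro k hk
    simp only [Nat.zero_add]
    have hset : PySem.List.pySetD ((List.range k).map (fun k => g ((k : Nat) : Int)) ++ a.drop k)
        ((k : Int)) (g (k : Int)) =
        (List.range k).map (fun k => g ((k : Nat) : Int)) ++ (a.drop k).set 0 (g (k : Int)) := by
      simp
    rw [hset, List.drop_eq_getElem_cons (by omega : k < a.length)]
    simp only [List.set_cons_zero, List.range_succ, List.map_append, List.map_cons, List.map_nil,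
      List.append_assoc, List.singleton_append]

lemma copy_eq (n : Nat) (src a : List Int) (hs : src.length = n) (ha : a.length = n) :
    (PySem.List.pyRange 0 ((n : Int)) 1).foldl
      (fun acc j => PySem.List.pySetD acc j (PySem.List.pyGetD src j 0)) a = src := by
  rw [setAll _ n a ha]
  apply List.ext_getElem (by simp [hs])
  intro i h1 h2
  simp [List.getElem?_eq_getElem (by omega : i < src.length)]

-- A's inner D-row loop produces row p+1 of the table
lemma rowA (cx cy : List Char) (ly p : Nat) (d : List Int) (hd : d.length = ly+1) :
    (PySem.List.pyRange 1 ((ly : Int)+1) 1).foldl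
      (fun r j => PySem.List.pySetD r j
        (min (2 + PySem.List.pyGetD r (j-1) 0)
          (min (2 + PySem.List.pyGetD (rowL cx cy ly p) j 0)
            (C_subL (PySem.List.pyGetD cx ((p : Int)) ' ') (PySem.List.pyGetD cy (j-1) ' ')
              + PySem.List.pyGetD (rowL cx cy ly p) (j-1) 0))))
      (PySem.List.pySetD d 0 (2*((p : Int)+1)))
    = rowL cx cy ly (p+1) := by
  have main := foldl_range_inv
    (fun r j => PySem.List.pySetD r j
      (min (2 + PySem.List.pyGetD r (j-1) 0)
        (min (2 + PySem.List.pyGetD (rowL cx cy ly p) j 0)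
          (C_subL (PySem.List.pyGetD cx ((p : Int)) ' ') (PySem.List.pyGetD cy (j-1) ' ')
            + PySem.List.pyGetD (rowL cx cy ly p) (j-1) 0))))
    (fun j => (List.range (j+1)).map (fun t => Ttab cx cy (p+1) t) ++ d.drop (j+1)) 1 ly ?_
  · have hb : (((1+ly : Nat)) : Int) = (ly : Int)+1 := by push_cast; ring
    have h0 : (List.range (0+1)).map (fun t => Ttab cx cy (p+1) t) ++ d.drop (0+1)
        = PySem.List.pySetD d 0 (2*((p : Int)+1)) := by
      cases d with
      | nil => simp at hd
      | cons c t =>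
        rw [PySem.List.pySetD_of_nonneg (xs := c :: t) (i := 0) (v := 2*((p : Int)+1)) (by norm_num)]
        simp [Ttab_zero]
    have hend : (List.range (ly+1)).map (fun t => Ttab cx cy (p+1) t) ++ d.drop (ly+1)
        = rowL cx cy ly (p+1) := by
      rw [List.drop_of_length_le (by omega), List.append_nil]; rfl
    rw [hb, Nat.cast_one, h0, hend] at main
    exact main
  · intro k hk
    have hc2 : (((1+k : Nat)) : Int) = ((k+1 : Nat) : Int) := by push_cast; ring
    have hc4 : (((k+1 : Nat)) : Int) - 1 = ((k : Nat) : Int) := by push_cast; ring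
    simp only [hc2, hc4]
    rw [pyGetD_cast ((List.range (k+1)).map (fun t => Ttab cx cy (p+1) t) ++ d.drop (k+1)) k 0]
    rw [List.getD_append _ _ _ _ (by simp : k < ((List.range (k+1)).map (fun t => Ttab cx cy (p+1) t)).length)]
    rw [PySem.List.getD_map_range _ _ _ _ (by omega : k < k+1)]
    rw [rowL_read cx cy ly p (k+1) (by omega), rowL_read cx cy ly p k (by omega)]
    rw [pyGetD_cast cx p ' ', pyGetD_cast cy k ' ']
    rw [← Ttab_succ cx cy p k]
    rw [PySem.List.pySetD_natCast]
    simp [List.range_succ]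
    rw [List.drop_eq_getElem_cons (show k+1 < d.length by omega)]
    rw [List.set_cons_zero]

-- A's I-propagation loop advances the cut row by one step of Jrow
lemma IloopA (cx cy : List Char) (lx ly p : Nat) (hm : lx/2 < p+1) (_hp : p+1 ≤ lx) :
    (PySem.List.pyRange 0 ((ly : Int)+1) 1).foldl
      (fun t j =>
        if PySem.List.pyGetD (rowL cx cy ly (p+1)) j 0 ==
            2 + PySem.List.pyGetD (rowL cx cy ly (p+1)) (j-1) 0 then
          PySem.List.pySetD t j (PySem.List.pyGetD t (j-1) 0)
        else if PySem.List.pyGetD (rowL cx cy ly (p+1)) j 0 ==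
            2 + PySem.List.pyGetD (rowL cx cy ly p) j 0 then
          PySem.List.pySetD t j (PySem.List.pyGetD t j 0)
        else if PySem.List.pyGetD (rowL cx cy ly (p+1)) j 0 ==
            C_subL (PySem.List.pyGetD cx ((p : Int)) ' ') (PySem.List.pyGetD cy (j-1) ' ')
              + PySem.List.pyGetD (rowL cx cy ly p) (j-1) 0 then
          PySem.List.pySetD t j (PySem.List.pyGetD (Jmap cx cy (lx/2) ly p) (j-1) 0)
        else t)
      (Jmap cx cy (lx/2) ly p)
    = Jmap cx cy (lx/2) ly (p+1) := by
  have main := foldl_range_inv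
    (fun t j =>
      if PySem.List.pyGetD (rowL cx cy ly (p+1)) j 0 ==
          2 + PySem.List.pyGetD (rowL cx cy ly (p+1)) (j-1) 0 then
        PySem.List.pySetD t j (PySem.List.pyGetD t (j-1) 0)
      else if PySem.List.pyGetD (rowL cx cy ly (p+1)) j 0 ==
          2 + PySem.List.pyGetD (rowL cx cy ly p) j 0 then
        PySem.List.pySetD t j (PySem.List.pyGetD t j 0)
      else if PySem.List.pyGetD (rowL cx cy ly (p+1)) j 0 ==
          C_subL (PySem.List.pyGetD cx ((p : Int)) ' ') (PySem.List.pyGetD cy (j-1) ' ')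
            + PySem.List.pyGetD (rowL cx cy ly p) (j-1) 0 then
        PySem.List.pySetD t j (PySem.List.pyGetD (Jmap cx cy (lx/2) ly p) (j-1) 0)
      else t)
    (fun j => (List.range j).map (Jfun cx cy (lx/2) ly (p+1))
      ++ (Jmap cx cy (lx/2) ly p).drop j) 0 (ly+1) ?_
  · have hb : (((0+(ly+1) : Nat)) : Int) = (ly : Int)+1 := by push_cast; ring
    have hend : (List.range (ly+1)).map (Jfun cx cy (lx/2) ly (p+1))
        ++ (Jmap cx cy (lx/2) ly p).drop (ly+1) = Jmap cx cy (lx/2) ly (p+1) := by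
      rw [List.drop_of_length_le (by rw [length_Jmap]), List.append_nil]; rfl
    rw [hb, Nat.cast_zero, hend] at main
    simpa using main
  · intro j hj
    simp only [Nat.zero_add]
    cases j with
    | zero =>
      simp only [Nat.zero_add, List.range_zero, List.map_nil, List.nil_append, List.drop_zero,
        Nat.cast_zero, zero_sub, List.range_one, List.map_cons, List.map_nil]
      simp only [PySem.List.pyGetD_zero]
      rw [rowL_getD cx cy ly (p+1) 0 (by omega), rowL_getD cx cy ly p 0 (by omega)]
      rw [rowL_read_neg cx cy ly (p+1)]
      rw [Jmap_read_neg cx cy (lx/2) ly p, Jmap_getD cx cy (lx/2) ly p 0 (by omega)]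
      have h2 : (Ttab cx cy (p+1) 0 == 2 + Ttab cx cy p 0) = true := by
        rw [beq_iff_eq, Ttab_zero, Ttab_zero]; push_cast; ring
      rw [h2]
      have hz : Jfun cx cy (lx/2) ly (p+1) 0 =
          if Ttab cx cy (p+1) 0 = 2 + Ttab cx cy (p+1) ly then Jfun cx cy (lx/2) ly p ly
          else Jfun cx cy (lx/2) ly p 0 := by
        rw [Jfun_step cx cy (lx/2) ly p hm]; rfl
      rw [hz]
      by_cases hc1 : (Ttab cx cy (p+1) 0 == 2 + Ttab cx cy (p+1) ly) = true
      · simp only [hc1, if_true, if_pos (beq_iff_eq.mp hc1)]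
        rw [PySem.List.pySetD_of_nonneg (xs := Jmap cx cy (lx/2) ly p) (i := 0)
          (v := Jfun cx cy (lx/2) ly p ly) (by norm_num)]
        simp only [Int.toNat_zero]
        rw [set_zero_head _ _ (by rw [length_Jmap]; omega)]
        simp
      · simp only [hc1, Bool.false_eq_true, if_false, if_true,
          if_neg (fun h => hc1 (beq_iff_eq.mpr h))]
        rw [PySem.List.pySetD_of_nonneg (xs := Jmap cx cy (lx/2) ly p) (i := 0)
          (v := Jfun cx cy (lx/2) ly p 0) (by norm_num)]
        simp only [Int.toNat_zero]
        rw [set_zero_head _ _ (by rw [length_Jmap]; omega)]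
        simp
    | succ jj =>
      have hjj : jj + 1 ≤ ly := by omega
      have hcj : (((jj+1 : Nat)) : Int) - 1 = ((jj : Nat) : Int) := by push_cast; ring
      simp only [hcj]
      have hdrop : (Jmap cx cy (lx/2) ly p).drop (jj+1)
          = Jfun cx cy (lx/2) ly p (jj+1) :: (Jmap cx cy (lx/2) ly p).drop (jj+2) := by
        rw [List.drop_eq_getElem_cons (by rw [length_Jmap]; omega)]
        rw [Jmap_getElem cx cy (lx/2) ly p (jj+1) (by omega)]
      rw [hdrop]
      rw [rowL_read cx cy ly (p+1) (jj+1) hjj, rowL_read cx cy ly (p+1) jj (by omega),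
        rowL_read cx cy ly p (jj+1) hjj, rowL_read cx cy ly p jj (by omega)]
      rw [Jmap_read cx cy (lx/2) ly p jj (by omega)]
      have hr1 : PySem.List.pyGetD ((List.range (jj+1)).map (Jfun cx cy (lx/2) ly (p+1))
          ++ Jfun cx cy (lx/2) ly p (jj+1) :: (Jmap cx cy (lx/2) ly p).drop (jj+2)) ((jj : Nat) : Int) 0
          = Jfun cx cy (lx/2) ly (p+1) jj := by
        rw [pyGetD_cast, List.getD_append _ _ _ _ (by simp),
          PySem.List.getD_map_range _ _ _ _ (by omega : jj < jj+1)]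
      have hr2 : PySem.List.pyGetD ((List.range (jj+1)).map (Jfun cx cy (lx/2) ly (p+1))
          ++ Jfun cx cy (lx/2) ly p (jj+1) :: (Jmap cx cy (lx/2) ly p).drop (jj+2)) (((jj+1 : Nat)) : Int) 0
          = Jfun cx cy (lx/2) ly p (jj+1) := by
        rw [pyGetD_cast, List.getD_append_right _ _ _ _ (by simp)]
        simp
      have hset : ∀ v : Int, PySem.List.pySetD ((List.range (jj+1)).map (Jfun cx cy (lx/2) ly (p+1))
          ++ Jfun cx cy (lx/2) ly p (jj+1) :: (Jmap cx cy (lx/2) ly p).drop (jj+2)) (((jj+1 : Nat)) : Int) v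
          = (List.range (jj+1)).map (Jfun cx cy (lx/2) ly (p+1))
            ++ v :: (Jmap cx cy (lx/2) ly p).drop (jj+2) := by
        intro v
        rw [PySem.List.pySetD_natCast, List.set_append]
        simp
      rw [hr1, hr2]
      have hrange : (List.range (jj+1+1)).map (Jfun cx cy (lx/2) ly (p+1))
          = (List.range (jj+1)).map (Jfun cx cy (lx/2) ly (p+1))
            ++ [Jfun cx cy (lx/2) ly (p+1) (jj+1)] := by
        rw [List.range_succ]; simp
      rw [hrange]
      have hs : Jfun cx cy (lx/2) ly (p+1) (jj+1) =
          if Ttab cx cy (p+1) (jj+1) = 2 + Ttab cx cy (p+1) jj then Jfun cx cy (lx/2) ly (p+1) jj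
          else if Ttab cx cy (p+1) (jj+1) = 2 + Ttab cx cy p (jj+1) then Jfun cx cy (lx/2) ly p (jj+1)
          else if Ttab cx cy (p+1) (jj+1) = C_subL (cx.getD p ' ') (cy.getD jj ' ') + Ttab cx cy p jj then
            Jfun cx cy (lx/2) ly p jj
          else Jfun cx cy (lx/2) ly p (jj+1) := by
        rw [Jfun_step cx cy (lx/2) ly p hm]
        show Jrow cx cy ly p (Jfun cx cy (lx/2) ly p) (jj+1) = _
        rw [Jrow]
        rw [← Jfun_step cx cy (lx/2) ly p hm jj]
      rw [hs, pyGetD_cast cx p ' ', pyGetD_cast cy jj ' ']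
      by_cases hc1 : (Ttab cx cy (p+1) (jj+1) == 2 + Ttab cx cy (p+1) jj) = true
      · simp only [hc1, if_true, if_pos (beq_iff_eq.mp hc1), hset]; simp
      · simp only [hc1, if_neg (fun h => hc1 (beq_iff_eq.mpr h))]
        by_cases hc2 : (Ttab cx cy (p+1) (jj+1) == 2 + Ttab cx cy p (jj+1)) = true
        · simp only [hc2, if_true, if_pos (beq_iff_eq.mp hc2), hset]; simp
        · simp only [hc2, if_neg (fun h => hc2 (beq_iff_eq.mpr h))]
          by_cases hc3 : (Ttab cx cy (p+1) (jj+1) ==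
              C_subL (cx.getD p ' ') (cy.getD jj ' ') + Ttab cx cy p jj) = true
          · simp only [hc3, if_true, if_pos (beq_iff_eq.mp hc3), hset]; simp
          · simp only [hc3, if_neg (fun h => hc3 (beq_iff_eq.mpr h))]
            simp

-- I rows stay the identity below the midpoint row
lemma Jmap_stable (cx cy : List Char) (m ly p : Nat) (h : p+1 ≤ m) :
    Jmap cx cy m ly p = Jmap cx cy m ly (p+1) := by
  unfold Jmap
  exact List.map_congr_left (fun j hj => by
    rw [Jfun_id cx cy m ly p (by omega) j, Jfun_id cx cy m ly (p+1) h j])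

lemma stepA (cx cy : List Char) (lx ly p : Nat) (hp : p < lx) :
    aStep cx cy ly lx (PA cx cy lx ly p) (((1+p : Nat)) : Int) = PA cx cy lx ly (p+1) := by
  have hcast : (((1+p : Nat)) : Int) = ((p : Int)+1) := by push_cast; ring
  have hcast2 : ((p : Int)+1) - 1 = ((p : Nat) : Int) := by ring
  unfold aStep PA
  simp only [hcast, hcast2]
  have hd : (if p = 0 then zerosL ly else rowL cx cy ly p).length = ly+1 := by
    by_cases h0 : p = 0 <;> simp [h0, zerosL, length_rowL]
  rw [rowA cx cy ly p _ hd]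
  have hval : PySem.Int.floordiv (lx : Int) 2 = ((lx/2 : Nat) : Int) := by
    exact_mod_cast PySem.Int.floordiv_natCast lx 2
  rw [hval]
  by_cases hgt : lx/2 < p+1
  · rw [if_pos (by omega : ((p : Int)+1) > ((lx/2 : Nat) : Int))]
    rw [IloopA cx cy lx ly p hgt (by omega)]
    rw [if_pos (by omega : ((p : Int)+1) > ((lx/2 : Nat) : Int))]
    rw [show ((ly : Int)+1) = ((ly+1 : Nat) : Int) by push_cast; ring]
    rw [copy_eq (ly+1) (rowL cx cy ly (p+1)) (rowL cx cy ly p) (length_rowL _ _ _ _) (length_rowL _ _ _ _)]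
    rw [copy_eq (ly+1) (Jmap cx cy (lx/2) ly (p+1)) (Jmap cx cy (lx/2) ly p) (length_Jmap _ _ _ _ _) (length_Jmap _ _ _ _ _)]
    simp
  · rw [if_neg (by omega : ¬ (((p : Int)+1) > ((lx/2 : Nat) : Int)))]
    rw [if_neg (by omega : ¬ (((p : Int)+1) > ((lx/2 : Nat) : Int)))]
    rw [show ((ly : Int)+1) = ((ly+1 : Nat) : Int) by push_cast; ring]
    rw [copy_eq (ly+1) (rowL cx cy ly (p+1)) (rowL cx cy ly p) (length_rowL _ _ _ _) (length_rowL _ _ _ _)]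
    rw [Jmap_stable cx cy (lx/2) ly p (by omega)]
    simp

-- B's column construction produces column q+1 of the table
lemma colB (cx cy : List Char) (lx q : Nat) :
    buildCol (colL cx cy lx q) cx cy ((q : Int)+1) lx = colL cx cy lx (q+1) := by
  unfold buildCol
  have main := foldl_range_inv
    (fun col i => col ++ [min (2 + PySem.List.pyGetD (colL cx cy lx q) i 0)
      (min (2 + PySem.List.pyGetD col (i-1) 0)
        (C_subL (PySem.List.pyGetD cx (i-1) ' ') (PySem.List.pyGetD cy (((q : Int)+1)-1) ' ')
          + PySem.List.pyGetD (colL cx cy lx q) (i-1) 0))])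
    (fun i => (List.range (i+1)).map (fun t => Ttab cx cy t (q+1))) 1 lx ?_
  · have hb : (((1+lx : Nat)) : Int) = (lx : Int)+1 := by push_cast; ring
    have h0 : (List.range (0+1)).map (fun t => Ttab cx cy t (q+1)) = [2*((q : Int)+1)] := by
      simp [Ttab]
    rw [hb, Nat.cast_one, h0] at main
    rw [main]
    rfl
  · intro k hk
    have hc2 : (((1+k : Nat)) : Int) = ((k+1 : Nat) : Int) := by push_cast; ring
    have hc4 : (((k+1 : Nat)) : Int) - 1 = ((k : Nat) : Int) := by push_cast; ring
    have hc3 : ((q : Int)+1)-1 = (q : Int) := by ring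
    simp only [hc2, hc4, hc3]
    rw [pyGetD_cast ((List.range (k+1)).map (fun t => Ttab cx cy t (q+1))) k 0,
        PySem.List.getD_map_range _ _ _ _ (by omega : k < k+1)]
    rw [colL_read cx cy lx q (k+1) (by omega), colL_read cx cy lx q k (by omega)]
    rw [pyGetD_cast cx k ' ', pyGetD_cast cy q ' ']
    rw [← Ttab_succ cx cy k q]
    simp [List.range_succ]

-- B's table is the transposed cost table
lemma tableBT (cx cy : List Char) (lx ly : Nat) :
    buildTableT cx cy lx ly = TBLT cx cy lx ly := by
  unfold buildTableT
  have hcol0 : (PySem.List.pyRange 0 ((lx : Int)+1) 1).map (fun i => 2*i) = colL cx cy lx 0 := by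
    rw [show ((lx : Int)+1) = ((lx+1 : Nat) : Int) by push_cast; ring, pyRange_zero_nat']
    apply List.ext_getElem (by simp [colL])
    intro i h1 h2
    simp [colL, Ttab_zero]
  have main := foldl_range_inv
    (fun T j => T ++ [buildCol (PySem.List.pyGetD T (j-1) []) cx cy j lx])
    (fun j => (List.range (j+1)).map (colL cx cy lx)) 1 ly ?_
  · have hb : (((1+ly : Nat)) : Int) = (ly : Int)+1 := by push_cast; ring
    have h0 : (List.range (0+1)).map (colL cx cy lx) = [colL cx cy lx 0] := by simp
    rw [hb, Nat.cast_one, h0] at main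
    rw [hcol0, main]
    rfl
  · intro k hk
    have hc2 : (((1+k : Nat)) : Int) = ((k : Int)+1) := by push_cast; ring
    have hc4 : ((k : Int)+1) - 1 = ((k : Nat) : Int) := by ring
    simp only [hc2, hc4]
    rw [pyGetD_cast ((List.range (k+1)).map (colL cx cy lx)) k [],
      PySem.List.getD_map_range _ _ _ _ (by omega : k < k+1)]
    rw [colB cx cy lx k]
    simp [List.range_succ]

-- B's inner cut loop advances the cut row by one step of Jrow
lemma IloopB (cx cy : List Char) (lx ly p : Nat) (hm : lx/2 < p+1) (hp : p+1 ≤ lx) :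
    (PySem.List.pyRange 0 ((ly : Int)+1) 1).foldl
      (fun nxt j =>
        if PySem.List.pyGetD (PySem.List.pyGetD (TBLT cx cy lx ly) j []) (((p+1 : Nat)) : Int) 0 ==
            2 + PySem.List.pyGetD (PySem.List.pyGetD (TBLT cx cy lx ly) (j-1) []) (((p+1 : Nat)) : Int) 0 then
          PySem.List.pySetD nxt j (PySem.List.pyGetD nxt (j-1) 0)
        else if !(PySem.List.pyGetD (PySem.List.pyGetD (TBLT cx cy lx ly) j []) (((p+1 : Nat)) : Int) 0 ==
            2 + PySem.List.pyGetD (PySem.List.pyGetD (TBLT cx cy lx ly) j []) ((((p+1 : Nat)) : Int)-1) 0) then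
          PySem.List.pySetD nxt j (PySem.List.pyGetD (Jmap cx cy (lx/2) ly p) (j-1) 0)
        else nxt)
      (Jmap cx cy (lx/2) ly p)
    = Jmap cx cy (lx/2) ly (p+1) := by
  have hci : (((p+1 : Nat)) : Int) - 1 = ((p : Nat) : Int) := by push_cast; ring
  have main := foldl_range_inv
    (fun nxt j =>
      if PySem.List.pyGetD (PySem.List.pyGetD (TBLT cx cy lx ly) j []) (((p+1 : Nat)) : Int) 0 ==
          2 + PySem.List.pyGetD (PySem.List.pyGetD (TBLT cx cy lx ly) (j-1) []) (((p+1 : Nat)) : Int) 0 then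
        PySem.List.pySetD nxt j (PySem.List.pyGetD nxt (j-1) 0)
      else if !(PySem.List.pyGetD (PySem.List.pyGetD (TBLT cx cy lx ly) j []) (((p+1 : Nat)) : Int) 0 ==
          2 + PySem.List.pyGetD (PySem.List.pyGetD (TBLT cx cy lx ly) j []) ((((p+1 : Nat)) : Int)-1) 0) then
        PySem.List.pySetD nxt j (PySem.List.pyGetD (Jmap cx cy (lx/2) ly p) (j-1) 0)
      else nxt)
    (fun j => (List.range j).map (Jfun cx cy (lx/2) ly (p+1))
      ++ (Jmap cx cy (lx/2) ly p).drop j) 0 (ly+1) ?_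
  · have hb : (((0+(ly+1) : Nat)) : Int) = (ly : Int)+1 := by push_cast; ring
    have hend : (List.range (ly+1)).map (Jfun cx cy (lx/2) ly (p+1))
        ++ (Jmap cx cy (lx/2) ly p).drop (ly+1) = Jmap cx cy (lx/2) ly (p+1) := by
      rw [List.drop_of_length_le (by rw [length_Jmap]), List.append_nil]; rfl
    rw [hb, Nat.cast_zero, hend] at main
    simpa using main
  · intro j hj
    simp only [Nat.zero_add, hci]
    cases j with
    | zero =>
      simp only [Nat.zero_add, List.range_zero, List.map_nil, List.nil_append, List.drop_zero,
        Nat.cast_zero, zero_sub, List.range_one, List.map_cons, List.map_nil]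
      have h0 : PySem.List.pyGetD (TBLT cx cy lx ly) 0 [] = colL cx cy lx 0 := by
        simpa using TBLT_read cx cy lx ly 0 (by omega)
      rw [h0, TBLT_read_neg cx cy lx ly]
      rw [colL_read cx cy lx 0 (p+1) hp, colL_read cx cy lx ly (p+1) hp,
        colL_read cx cy lx 0 p (by omega)]
      rw [Jmap_read_neg cx cy (lx/2) ly p]
      have h2 : (Ttab cx cy (p+1) 0 == 2 + Ttab cx cy p 0) = true := by
        rw [beq_iff_eq, Ttab_zero, Ttab_zero]; push_cast; ring
      rw [h2]
      have hz : Jfun cx cy (lx/2) ly (p+1) 0 =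
          if Ttab cx cy (p+1) 0 = 2 + Ttab cx cy (p+1) ly then Jfun cx cy (lx/2) ly p ly
          else Jfun cx cy (lx/2) ly p 0 := by
        rw [Jfun_step cx cy (lx/2) ly p hm]; rfl
      rw [hz]
      by_cases hc1 : (Ttab cx cy (p+1) 0 == 2 + Ttab cx cy (p+1) ly) = true
      · simp only [hc1, if_true, if_pos (beq_iff_eq.mp hc1)]
        rw [PySem.List.pySetD_of_nonneg (xs := Jmap cx cy (lx/2) ly p) (i := 0)
          (v := Jfun cx cy (lx/2) ly p ly) (by norm_num)]
        simp only [Int.toNat_zero]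
        rw [set_zero_head _ _ (by rw [length_Jmap]; omega)]
        simp
      · simp only [hc1, Bool.false_eq_true, if_false, Bool.not_true,
          if_neg (fun h => hc1 (beq_iff_eq.mpr h))]
        have hhead : Jmap cx cy (lx/2) ly p
            = Jfun cx cy (lx/2) ly p 0 :: (Jmap cx cy (lx/2) ly p).drop 1 := by
          have hd := List.drop_eq_getElem_cons
            (l := Jmap cx cy (lx/2) ly p) (i := 0) (by rw [length_Jmap]; omega)
          rw [List.drop_zero] at hd
          rw [Jmap_getElem cx cy (lx/2) ly p 0 (by omega)] at hd
          exact hd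
        simpa using hhead
    | succ jj =>
      have hjj : jj + 1 ≤ ly := by omega
      have hcj : (((jj+1 : Nat)) : Int) - 1 = ((jj : Nat) : Int) := by push_cast; ring
      simp only [hcj]
      have hdrop : (Jmap cx cy (lx/2) ly p).drop (jj+1)
          = Jfun cx cy (lx/2) ly p (jj+1) :: (Jmap cx cy (lx/2) ly p).drop (jj+2) := by
        rw [List.drop_eq_getElem_cons (by rw [length_Jmap]; omega)]
        rw [Jmap_getElem cx cy (lx/2) ly p (jj+1) (by omega)]
      rw [hdrop]
      rw [TBLT_read cx cy lx ly (jj+1) hjj, TBLT_read cx cy lx ly jj (by omega)]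
      rw [colL_read cx cy lx (jj+1) (p+1) hp, colL_read cx cy lx jj (p+1) hp,
        colL_read cx cy lx (jj+1) p (by omega)]
      rw [Jmap_read cx cy (lx/2) ly p jj (by omega)]
      have hr1 : PySem.List.pyGetD ((List.range (jj+1)).map (Jfun cx cy (lx/2) ly (p+1))
          ++ Jfun cx cy (lx/2) ly p (jj+1) :: (Jmap cx cy (lx/2) ly p).drop (jj+2)) ((jj : Nat) : Int) 0
          = Jfun cx cy (lx/2) ly (p+1) jj := by
        rw [pyGetD_cast, List.getD_append _ _ _ _ (by simp),
          PySem.List.getD_map_range _ _ _ _ (by omega : jj < jj+1)]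
      have hset : ∀ v : Int, PySem.List.pySetD ((List.range (jj+1)).map (Jfun cx cy (lx/2) ly (p+1))
          ++ Jfun cx cy (lx/2) ly p (jj+1) :: (Jmap cx cy (lx/2) ly p).drop (jj+2)) (((jj+1 : Nat)) : Int) v
          = (List.range (jj+1)).map (Jfun cx cy (lx/2) ly (p+1))
            ++ v :: (Jmap cx cy (lx/2) ly p).drop (jj+2) := by
        intro v
        rw [PySem.List.pySetD_natCast, List.set_append]
        simp
      rw [hr1]
      have hrange : (List.range (jj+1+1)).map (Jfun cx cy (lx/2) ly (p+1))
          = (List.range (jj+1)).map (Jfun cx cy (lx/2) ly (p+1))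
            ++ [Jfun cx cy (lx/2) ly (p+1) (jj+1)] := by
        rw [List.range_succ]; simp
      rw [hrange]
      have hs : Jfun cx cy (lx/2) ly (p+1) (jj+1) =
          if Ttab cx cy (p+1) (jj+1) = 2 + Ttab cx cy (p+1) jj then Jfun cx cy (lx/2) ly (p+1) jj
          else if Ttab cx cy (p+1) (jj+1) = 2 + Ttab cx cy p (jj+1) then Jfun cx cy (lx/2) ly p (jj+1)
          else if Ttab cx cy (p+1) (jj+1) = C_subL (cx.getD p ' ') (cy.getD jj ' ') + Ttab cx cy p jj then
            Jfun cx cy (lx/2) ly p jj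
          else Jfun cx cy (lx/2) ly p (jj+1) := by
        rw [Jfun_step cx cy (lx/2) ly p hm]
        show Jrow cx cy ly p (Jfun cx cy (lx/2) ly p) (jj+1) = _
        rw [Jrow]
        rw [← Jfun_step cx cy (lx/2) ly p hm jj]
      rw [hs]
      by_cases hc1 : (Ttab cx cy (p+1) (jj+1) == 2 + Ttab cx cy (p+1) jj) = true
      · simp only [hc1, if_true, if_pos (beq_iff_eq.mp hc1), hset]; simp
      · simp only [hc1, if_neg (fun h => hc1 (beq_iff_eq.mpr h)), Bool.false_eq_true, if_false]
        by_cases hc2 : (Ttab cx cy (p+1) (jj+1) == 2 + Ttab cx cy p (jj+1)) = true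
        · simp only [hc2, Bool.not_true, if_pos (beq_iff_eq.mp hc2), Bool.false_eq_true, if_false]
          simp
        · have hdiag : Ttab cx cy (p+1) (jj+1)
              = C_subL (cx.getD p ' ') (cy.getD jj ' ') + Ttab cx cy p jj := by
            refine min3_third _ _ _ _ (Ttab_succ cx cy p jj) ?_ ?_
            · exact fun h => hc1 (beq_iff_eq.mpr h)
            · exact fun h => hc2 (beq_iff_eq.mpr h)
          simp only [hc2, Bool.not_false, if_true, hset,
            if_neg (fun h => hc2 (beq_iff_eq.mpr h)), if_pos hdiag]
          simp

theorem coupure_eq_alt (x y : String) : coupure x y = coupure_alt x y := by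
  unfold coupure coupure_alt
  simp only []
  set cx := x.toList with hcx
  set cy := y.toList with hcy
  set lx := cx.length with hlx
  set ly := cy.length with hly
  have hJ0 : (List.range (ly+1)).map (fun k : Nat => ((k : Nat) : Int))
      = Jmap cx cy (lx/2) ly 0 := by
    unfold Jmap
    exact List.map_congr_left (fun j _ => (Jfun_id cx cy (lx/2) ly 0 (by omega) j).symm)
  -- A side
  have hIpair : (PySem.List.pyRange 0 ((ly : Int)+1) 1).foldl
      (fun (p : List Int × List Int) j => (PySem.List.pySetD p.1 j j, PySem.List.pySetD p.2 j j))
      (List.replicate (ly+1) 0, List.replicate (ly+1) 0)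
      = (Jmap cx cy (lx/2) ly 0, Jmap cx cy (lx/2) ly 0) := by
    rw [PySem.List.foldl_prod_mk (f := fun a j => PySem.List.pySetD a j j)
      (g := fun a j => PySem.List.pySetD a j j)]
    rw [show ((ly : Int)+1) = ((ly+1 : Nat) : Int) by push_cast; ring]
    rw [setAll (fun j => j) (ly+1) _ (List.length_replicate)]
    rw [hJ0]
  have hDpair : (PySem.List.pyRange 0 ((ly : Int)+1) 1).foldl
      (fun (p : List Int × List Int) j => (p.1 ++ [j*2], p.2 ++ [0]))
      (([] : List Int), ([] : List Int))
      = (rowL cx cy ly 0, zerosL ly) := by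
    rw [PySem.List.foldl_prod_mk (f := fun a j => a ++ [j*2]) (g := fun a j => a ++ [0])]
    rw [PySem.List.foldl_append_singleton_eq_map (f := fun j => j*2),
      PySem.List.foldl_append_singleton_eq_map (f := fun _ => (0 : Int))]
    rw [show ((ly : Int)+1) = ((ly+1 : Nat) : Int) by push_cast; ring,
      pyRange_zero_nat']
    simp only [List.nil_append]
    refine Prod.ext ?_ ?_
    · apply List.ext_getElem (by simp [rowL])
      intro i h1 h2
      simp [rowL, Ttab]
      ring
    · apply List.ext_getElem (by simp [zerosL])
      intro i h1 h2
      simp [zerosL]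
  rw [hIpair, hDpair]
  have hPA0 : ((rowL cx cy ly 0, zerosL ly),
      Jmap cx cy (lx/2) ly 0, Jmap cx cy (lx/2) ly 0) = PA cx cy lx ly 0 := by
    simp [PA]
  rw [hPA0]
  have hloopA := foldl_range_inv (aStep cx cy ly lx) (PA cx cy lx ly) 1 lx
    (fun k hk => stepA cx cy lx ly k hk)
  rw [Nat.cast_one, show ((1+lx : Nat) : Int) = ((lx : Int)+1) by push_cast; ring] at hloopA
  rw [hloopA]
  have hPAe : (PA cx cy lx ly lx).2.2 = Jmap cx cy (lx/2) ly lx := rfl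
  rw [hPAe, Jmap_read cx cy (lx/2) ly lx ly (le_refl _)]
  -- B side
  rw [tableBT cx cy lx ly]
  have hcut0 : (PySem.List.pyRange 0 ((ly : Int)+1) 1).map (fun j => j)
      = Jmap cx cy (lx/2) ly (lx/2) := by
    rw [show ((ly : Int)+1) = ((ly+1 : Nat) : Int) by push_cast; ring, pyRange_zero_nat']
    unfold Jmap
    apply List.ext_getElem (by simp)
    intro i h1 h2
    simp only [List.getElem_map, List.getElem_range]
    rw [Jfun_id cx cy (lx/2) ly (lx/2) (le_refl _)]
  rw [hcut0]
  have hloopB := foldl_range_inv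
    (fun cut i =>
      (PySem.List.pyRange 0 ((ly : Int)+1) 1).foldl
        (fun nxt j =>
          if PySem.List.pyGetD (PySem.List.pyGetD (TBLT cx cy lx ly) j []) i 0 ==
              2 + PySem.List.pyGetD (PySem.List.pyGetD (TBLT cx cy lx ly) (j-1) []) i 0 then
            PySem.List.pySetD nxt j (PySem.List.pyGetD nxt (j-1) 0)
          else if !(PySem.List.pyGetD (PySem.List.pyGetD (TBLT cx cy lx ly) j []) i 0 ==
              2 + PySem.List.pyGetD (PySem.List.pyGetD (TBLT cx cy lx ly) j []) (i-1) 0) then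
            PySem.List.pySetD nxt j (PySem.List.pyGetD cut (j-1) 0)
          else nxt)
        cut)
    (fun k => Jmap cx cy (lx/2) ly (lx/2 + k)) (lx/2 + 1) (lx - lx/2) ?_
  · rw [show ((lx/2 + 1 + (lx - lx/2) : Nat) : Int) = ((lx : Int)+1) by
      have : lx/2 + 1 + (lx - lx/2) = lx + 1 := by omega
      rw [this]; push_cast; ring] at hloopB
    simp only [Nat.add_zero] at hloopB
    rw [hloopB]
    rw [show lx/2 + (lx - lx/2) = lx by omega]
    rw [Jmap_read cx cy (lx/2) ly lx ly (le_refl _)]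
  · intro k hk
    have hidx : ((lx/2 + 1 + k : Nat) : Int) = (((lx/2 + k) + 1 : Nat) : Int) := by
      congr 1
      omega
    rw [hidx]
    exact IloopB cx cy lx ly (lx/2 + k) (by omega) (by omega)

-- ===== VERDICT (by name: the statement is the Claim_ definition above) =====
theorem coupure_spec : Claim_equal_coupure := by
  intro x y _
  unfold Spec_coupure
  exact coupure_eq_alt x y
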